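-- pv_equiv track=rewrite | github.com/willmurray9/march-madness-2026 | src/mm2026/observability/feature_dictionary.py | _parse_metric_suffix
-- ===== SOURCE A (Python) =====
-- def _parse_metric_suffix(metric: str) -> tuple[str, str]:
--     for suffix in [
--         "season_mean",
--         "roll_short",
--         "roll_mid",
--         "roll_long",
--         "trend_short_long",
--         "vol_short",
--         "vol_mid",
--         "vol_long",
--     ]:
--         token = f"_{suffix}"
--         if metric.endswith(token):
--             return metric[: -len(token)], suffix
--     return metric, "snapshot"
-- ===== SOURCE B (Python) =====
-- _SUFFIXES_3 = frozenset({"trend_short_long"})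
-- _SUFFIXES_2 = frozenset({
--     "season_mean", "roll_short", "roll_mid", "roll_long",
--     "vol_short", "vol_mid", "vol_long",
-- })
--
--
-- def _parse_metric_suffix(metric: str) -> tuple[str, str]:
--     parts = metric.split("_")
--     tail3 = "_".join(parts[-3:])
--     if len(parts) > 3 and tail3 in _SUFFIXES_3:
--         return "_".join(parts[:-3]), tail3
--     tail2 = "_".join(parts[-2:])
--     if len(parts) > 2 and tail2 in _SUFFIXES_2:
--         return "_".join(parts[:-2]), tail2
--     return metric, "snapshot"
-- ===== Notes on version B (the rewrite author's own statement) =====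
-- stated objective: idiomatic
-- what changed: Replaces the linear scan of eight endswith probes (each slicing by the token's length) with one tokenization: split the metric on underscores once and look up the joined last 3 (then last 2) tokens in a frozenset of known suffixes, rejoining the leading tokens as the base.
import Mathlib
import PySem

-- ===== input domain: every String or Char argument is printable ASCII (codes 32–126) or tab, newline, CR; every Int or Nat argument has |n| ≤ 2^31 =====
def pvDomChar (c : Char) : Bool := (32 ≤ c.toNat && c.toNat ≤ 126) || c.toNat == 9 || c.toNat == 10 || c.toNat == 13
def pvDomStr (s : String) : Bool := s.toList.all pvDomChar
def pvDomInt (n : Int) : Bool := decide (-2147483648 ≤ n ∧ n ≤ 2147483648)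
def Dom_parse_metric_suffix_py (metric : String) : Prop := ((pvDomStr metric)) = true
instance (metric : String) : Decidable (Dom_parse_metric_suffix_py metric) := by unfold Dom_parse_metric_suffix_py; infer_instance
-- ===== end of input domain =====

-- B replaces A's linear scan of eight endswith probes by one split-on-'_' plus a frozenset
-- lookup of the joined trailing tokens (objective: idiomatic; same observable behaviour).

-- ===== PORT A =====
-- the for-loop over the literal suffix list, returning at the first endswith hit
def pyA_go : List String → String → String × String
  | [], m => (m, "snapshot")
  | s :: rest, m =>
      let token := "_" ++ s
      if PySem.Str.endswith m token then
        (PySem.Str.slice m none (some (-(PySem.Str.len token : Int))), s)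
      else pyA_go rest m

def parse_metric_suffix_py (metric : String) : String × String :=
  pyA_go ["season_mean", "roll_short", "roll_mid", "roll_long",
          "trend_short_long", "vol_short", "vol_mid", "vol_long"] metric

-- ===== PORT B =====
def pvSuf3 : PySem.Set String := PySem.Set.ofList ["trend_short_long"]
def pvSuf2 : PySem.Set String :=
  PySem.Set.ofList ["season_mean", "roll_short", "roll_mid", "roll_long",
                    "vol_short", "vol_mid", "vol_long"]

def parse_metric_suffix_py_alt (metric : String) : String × String :=
  let parts : List String := (PySem.Str.split? metric "_").getD []
  let tail3 := PySem.Str.join "_" (PySem.List.slice parts (some (-3)) none)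
  if decide (3 < parts.length) && decide (tail3 ∈ pvSuf3) then
    (PySem.Str.join "_" (PySem.List.slice parts none (some (-3))), tail3)
  else
    let tail2 := PySem.Str.join "_" (PySem.List.slice parts (some (-2)) none)
    if decide (2 < parts.length) && decide (tail2 ∈ pvSuf2) then
      (PySem.Str.join "_" (PySem.List.slice parts none (some (-2))), tail2)
    else (metric, "snapshot")

-- ===== PRECONDITION & SPEC =====
def Spec_parse_metric_suffix_py (metric : String) (out : String × String) : Prop := out = parse_metric_suffix_py_alt metric
instance (metric : String) (out : String × String) : Decidable (Spec_parse_metric_suffix_py metric out) := by unfold Spec_parse_metric_suffix_py; infer_instance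

-- ===== CLAIM (what is proved, stated in full; the proofs are below) =====
def Claim_equal_parse_metric_suffix_py : Prop := ∀ (metric : String), Dom_parse_metric_suffix_py metric → Spec_parse_metric_suffix_py metric (parse_metric_suffix_py metric)

-- ===== LEMMAS AND PROOFS =====

-- piece-prepend helper
def pvConsH (p : List Char) : List (List Char) → List (List Char)
  | [] => [p]
  | h :: t => (p ++ h) :: t

-- simple split-on-'_' recursion
def pvSp : List Char → List (List Char)
  | [] => [[]]
  | c :: rest => if c = '_' then [] :: pvSp rest else pvConsH [c] (pvSp rest)

theorem pvSp_ne_nil (l : List Char) : pvSp l ≠ [] := by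
  induction l with
  | nil => simp [pvSp]
  | cons c rest ih =>
    simp only [pvSp]
    split
    · simp
    · cases h : pvSp rest with
      | nil => exact absurd h ih
      | cons a t => simp [pvConsH]

theorem pvConsH_consH (p q : List Char) (ps : List (List Char)) :
    pvConsH p (pvConsH q ps) = pvConsH (p ++ q) ps := by
  cases ps <;> simp [pvConsH]

theorem pvGo_eq (fuel : Nat) (l cur : List Char) (acc : List (List Char))
    (h : l.length ≤ fuel) :
    PySem.Chars.splitOn.go ['_'] fuel l cur acc
      = acc.reverse ++ pvConsH cur.reverse (pvSp l) := by
  induction fuel generalizing l cur acc with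
  | zero =>
    have : l = [] := by cases l <;> simp_all
    subst this
    simp [PySem.Chars.splitOn.go, pvSp, pvConsH]
  | succ fuel ih =>
    cases l with
    | nil => simp [PySem.Chars.splitOn.go, pvSp, pvConsH]
    | cons c rest =>
      simp only [PySem.Chars.splitOn.go]
      by_cases hc : c = '_'
      · subst hc
        rw [if_pos (by simp)]
        have hd : List.drop ['_'].length ('_' :: rest) = rest := rfl
        rw [hd]
        simp only [List.length_cons] at h
        rw [ih _ _ _ (by omega)]
        have hne := pvSp_ne_nil rest
        cases hsp : pvSp rest with
        | nil => exact absurd hsp hne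
        | cons a t => simp [pvSp, pvConsH, hsp]
      · rw [if_neg (by simp; exact fun e => hc e.symm)]
        simp only [List.length_cons] at h
        rw [ih _ _ _ (by omega)]
        simp [pvSp, hc, pvConsH_consH]

theorem pvSplitOn_eq (l : List Char) : PySem.Chars.splitOn l ['_'] = pvSp l := by
  rw [PySem.Chars.splitOn, pvGo_eq _ _ _ _ (by omega)]
  have hne := pvSp_ne_nil l
  cases hsp : pvSp l with
  | nil => exact absurd hsp hne
  | cons a t => simp [pvConsH]

theorem pvInt_cc (a b : List Char) (t : List (List Char)) :
    List.intercalate ['_'] (a :: b :: t) = a ++ '_' :: List.intercalate ['_'] (b :: t) := by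
  simp [List.intercalate]

theorem pvInt_single (a : List Char) : List.intercalate ['_'] [a] = a := by
  simp [List.intercalate]

theorem pvJoin_sp (l : List Char) : List.intercalate ['_'] (pvSp l) = l := by
  induction l with
  | nil => simp [pvSp, List.intercalate]
  | cons c rest ih =>
    simp only [pvSp]
    by_cases hc : c = '_'
    · subst hc
      rw [if_pos rfl]
      cases hsp : pvSp rest with
      | nil => exact absurd hsp (pvSp_ne_nil rest)
      | cons a t =>
        rw [hsp] at ih
        rw [pvInt_cc]
        simpa using ih
    · rw [if_neg hc]
      cases hsp : pvSp rest with
      | nil => exact absurd hsp (pvSp_ne_nil rest)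
      | cons a t =>
        rw [hsp] at ih
        cases t with
        | nil => simpa [pvConsH, pvInt_single] using ih
        | cons b t' =>
          rw [pvInt_cc] at ih
          simp only [pvConsH, pvInt_cc, List.cons_append]
          simpa using ih

theorem pvSp_append (a b : List Char) : pvSp (a ++ '_' :: b) = pvSp a ++ pvSp b := by
  induction a with
  | nil => simp [pvSp]
  | cons c a' ih =>
    simp only [List.cons_append, pvSp, ih]
    by_cases hc : c = '_'
    · simp [hc]
    · rw [if_neg hc, if_neg hc]
      cases hsp : pvSp a' with
      | nil => exact absurd hsp (pvSp_ne_nil a')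
      | cons x t => simp [pvConsH]

theorem pvSp_free (p : List Char) (h : '_' ∉ p) : pvSp p = [p] := by
  induction p with
  | nil => simp [pvSp]
  | cons c p' ih =>
    simp only [List.mem_cons, not_or] at h
    simp only [pvSp]
    rw [if_neg (fun e => h.1 e.symm), ih h.2]
    rfl

theorem pvSp_no_us (l : List Char) : ∀ p ∈ pvSp l, '_' ∉ p := by
  induction l with
  | nil => simp [pvSp]
  | cons c rest ih =>
    simp only [pvSp]
    by_cases hc : c = '_'
    · subst hc
      rw [if_pos rfl]
      intro p hp
      rcases List.mem_cons.mp hp with h | h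
      · simp [h]
      · exact ih p h
    · rw [if_neg hc]
      cases hsp : pvSp rest with
      | nil => exact absurd hsp (pvSp_ne_nil rest)
      | cons a t =>
        intro p hp
        simp only [pvConsH, List.cons_append, List.nil_append, List.mem_cons] at hp
        rcases hp with h | h
        · subst h
          intro hmem
          rcases List.mem_cons.mp hmem with h | h
          · exact hc h.symm
          · exact ih a (by simp [hsp]) h
        · exact ih p (by simp [hsp, h])

theorem pvIntercalate_append (g h : List (List Char)) (hg : g ≠ []) (hh : h ≠ []) :
    List.intercalate ['_'] (g ++ h)
      = List.intercalate ['_'] g ++ '_' :: List.intercalate ['_'] h := by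
  induction g with
  | nil => exact absurd rfl hg
  | cons a g' ih =>
    cases g' with
    | nil =>
      cases h with
      | nil => exact absurd rfl hh
      | cons b h' => simp [pvInt_cc, pvInt_single]
    | cons a' g'' =>
      have := ih (by simp)
      simp only [List.cons_append, pvInt_cc] at *
      simp [this]

theorem pvSp_intercalate (parts : List (List Char)) (hne : parts ≠ [])
    (hfree : ∀ p ∈ parts, '_' ∉ p) :
    pvSp (List.intercalate ['_'] parts) = parts := by
  induction parts with
  | nil => exact absurd rfl hne
  | cons p parts' ih =>
    cases parts' with
    | nil => simpa [pvInt_single] using pvSp_free p (hfree p (by simp))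
    | cons q t =>
      rw [pvInt_cc, pvSp_append, pvSp_free p (hfree p (by simp))]
      rw [ih (by simp) (fun r hr => hfree r (by simp [hr]))]
      rfl

-- endswith characterised on pvSp
theorem pvEnds_iff (l t : List Char) :
    ('_' :: t) <:+ l ↔
      (pvSp t).length < (pvSp l).length ∧
        (pvSp l).drop ((pvSp l).length - (pvSp t).length) = pvSp t := by
  constructor
  · rintro ⟨pre, rfl⟩
    rw [pvSp_append]
    have h1 := pvSp_ne_nil pre
    constructor
    · have : 0 < (pvSp pre).length := List.length_pos_of_ne_nil h1
      simp only [List.length_append]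
      omega
    · simp only [List.length_append]
      rw [show (pvSp pre).length + (pvSp t).length - (pvSp t).length = (pvSp pre).length by omega]
      simp
  · rintro ⟨hlt, hdrop⟩
    obtain ⟨g, hgne, hsplit⟩ : ∃ g, g ≠ [] ∧ pvSp l = g ++ pvSp t := by
      refine ⟨(pvSp l).take ((pvSp l).length - (pvSp t).length), ?_, ?_⟩
      · apply List.ne_nil_of_length_pos
        rw [List.length_take]
        omega
      · have h0 := List.take_append_drop ((pvSp l).length - (pvSp t).length) (pvSp l)
        rw [hdrop] at h0
        exact h0.symm
    refine ⟨List.intercalate ['_'] g, ?_⟩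
    conv_rhs => rw [← pvJoin_sp l]
    rw [hsplit, pvIntercalate_append g (pvSp t) hgne (pvSp_ne_nil t), pvJoin_sp]

theorem pvParts_eq (metric : String) :
    (PySem.Str.split? metric "_").getD [] = (pvSp metric.toList).map String.ofList := by
  have h := PySem.Str.split?_map metric "_"
  rw [show ("_" : String).toList = ['_'] from rfl, PySem.Chars.split?] at h
  simp only [List.isEmpty_cons, if_false, Bool.false_eq_true] at h
  cases hs : PySem.Str.split? metric "_" with
  | none => rw [hs] at h; simp at h
  | some ps =>
    rw [hs] at h
    simp only [Option.map_some, Option.some.injEq] at h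
    rw [pvSplitOn_eq] at h
    rw [Option.getD_some, ← h, List.map_map]
    simp [Function.comp_def, String.ofList_toList]

theorem pvCond_iff (metric s : String) :
    PySem.Str.endswith metric ("_" ++ s) = true ↔
      (pvSp s.toList).length < (pvSp metric.toList).length ∧
        (pvSp metric.toList).drop
          ((pvSp metric.toList).length - (pvSp s.toList).length) = pvSp s.toList := by
  rw [PySem.Str.endswith_eq, PySem.Chars.endswith_iff,
      show ("_" ++ s).toList = '_' :: s.toList by simp]
  exact pvEnds_iff _ _

theorem pvCond2 (metric s : String) (a b : List Char)
    (hsp : pvSp s.toList = [a, b]) :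
    PySem.Str.endswith metric ("_" ++ s) = true ↔
      2 < (pvSp metric.toList).length ∧
        (pvSp metric.toList).drop ((pvSp metric.toList).length - 2) = [a, b] := by
  rw [pvCond_iff metric s, hsp]
  simp

theorem pvCond3 (metric s : String) (a b c : List Char)
    (hsp : pvSp s.toList = [a, b, c]) :
    PySem.Str.endswith metric ("_" ++ s) = true ↔
      3 < (pvSp metric.toList).length ∧
        (pvSp metric.toList).drop ((pvSp metric.toList).length - 3) = [a, b, c] := by
  rw [pvCond_iff metric s, hsp]
  simp

theorem pvTail_eq (metric s : String) (m : Nat)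
    (h : (pvSp metric.toList).drop m = pvSp s.toList) :
    PySem.Str.join "_" (((pvSp metric.toList).drop m).map String.ofList) = s := by
  apply String.toList_inj.mp
  rw [PySem.Str.toList_join, List.map_map]
  simp only [Function.comp_def, String.toList_ofList, List.map_id']
  rw [show ("_" : String).toList = ['_'] from rfl, PySem.Chars.join, h, pvJoin_sp]

theorem pvTail_inv (metric s : String) (m : Nat) (hm : m < (pvSp metric.toList).length)
    (heq : PySem.Str.join "_" (((pvSp metric.toList).drop m).map String.ofList) = s) :
    (pvSp metric.toList).drop m = pvSp s.toList := by
  have h1 : List.intercalate ['_'] ((pvSp metric.toList).drop m) = s.toList := by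
    have h0 := congrArg String.toList heq
    rw [PySem.Str.toList_join, List.map_map] at h0
    simp only [Function.comp_def, String.toList_ofList, List.map_id'] at h0
    rw [show ("_" : String).toList = ['_'] from rfl, PySem.Chars.join] at h0
    exact h0
  have hne : (pvSp metric.toList).drop m ≠ [] := by
    apply List.ne_nil_of_length_pos
    rw [List.length_drop]
    omega
  have hfree : ∀ p ∈ (pvSp metric.toList).drop m, '_' ∉ p :=
    fun p hp => pvSp_no_us metric.toList p (List.mem_of_mem_drop hp)
  have h2 := pvSp_intercalate ((pvSp metric.toList).drop m) hne hfree
  rw [h1] at h2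
  exact h2.symm

theorem pvBase_eq (metric s : String)
    (hlt : (pvSp s.toList).length < (pvSp metric.toList).length)
    (h : (pvSp metric.toList).drop
          ((pvSp metric.toList).length - (pvSp s.toList).length) = pvSp s.toList) :
    PySem.Str.slice metric none (some (-(PySem.Str.len ("_" ++ s) : Int)))
      = PySem.Str.join "_"
          (((pvSp metric.toList).take
              ((pvSp metric.toList).length - (pvSp s.toList).length)).map String.ofList) := by
  obtain ⟨pre, hpre⟩ := (pvEnds_iff metric.toList s.toList).mpr ⟨hlt, h⟩
  apply String.toList_inj.mp
  have hlen : PySem.Str.len ("_" ++ s) = ((s.toList.length + 1 : Nat) : Int) := by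
    simp [PySem.Str.len, String.toList_append,
          show ("_" : String).toList = ['_'] from rfl]
  rw [hlen, PySem.Str.toList_slice, PySem.Chars.slice_eq_listSlice,
      PySem.List.slice_to_neg_natCast metric.toList (s.toList.length + 1) (by omega)]
  have hml : metric.toList = pre ++ '_' :: s.toList := hpre.symm
  have hprelen : metric.toList.length - (s.toList.length + 1) = pre.length := by
    rw [hml]; simp
  have htake : metric.toList.take (metric.toList.length - (s.toList.length + 1)) = pre := by
    rw [hprelen, hml, List.take_left]
  rw [htake, PySem.Str.toList_join, List.map_map]
  simp only [Function.comp_def, String.toList_ofList, List.map_id']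
  rw [show ("_" : String).toList = ['_'] from rfl, PySem.Chars.join]
  have hspl : pvSp metric.toList = pvSp pre ++ pvSp s.toList := by
    rw [hml, pvSp_append]
  have htk : (pvSp metric.toList).take
      ((pvSp metric.toList).length - (pvSp s.toList).length) = pvSp pre := by
    rw [hspl, List.length_append,
        show (pvSp pre).length + (pvSp s.toList).length - (pvSp s.toList).length
          = (pvSp pre).length by omega, List.take_left]
  rw [htk, pvJoin_sp]

-- B's three branches, characterised on pvSp
theorem pvAlt_three (metric : String)
    (h3 : 3 < (pvSp metric.toList).length ∧
      (pvSp metric.toList).drop ((pvSp metric.toList).length - 3)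
        = ["trend".toList, "short".toList, "long".toList]) :
    parse_metric_suffix_py_alt metric
      = (PySem.Str.join "_"
           (((pvSp metric.toList).take ((pvSp metric.toList).length - 3)).map String.ofList),
         PySem.Str.join "_"
           (((pvSp metric.toList).drop ((pvSp metric.toList).length - 3)).map String.ofList)) := by
  unfold parse_metric_suffix_py_alt
  simp only []
  rw [pvParts_eq]
  rw [PySem.List.slice_from_neg_ofNat _ 3 (by omega),
      PySem.List.slice_to_neg_ofNat _ 3 (by omega),
      List.length_map, ← List.map_drop, ← List.map_take]
  rw [if_pos]
  rw [Bool.and_eq_true, decide_eq_true_iff, decide_eq_true_iff]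
  refine ⟨h3.1, ?_⟩
  have := pvTail_eq metric "trend_short_long" ((pvSp metric.toList).length - 3)
    (by rw [h3.2]; decide)
  rw [this, pvSuf3, PySem.Set.mem_ofList]
  simp

theorem pvAlt_two (metric : String)
    (h3 : ¬ (3 < (pvSp metric.toList).length ∧
      (pvSp metric.toList).drop ((pvSp metric.toList).length - 3)
        = ["trend".toList, "short".toList, "long".toList]))
    (hn : 2 < (pvSp metric.toList).length)
    (s : String)
    (hmem : s ∈ (["season_mean", "roll_short", "roll_mid", "roll_long",
                   "vol_short", "vol_mid", "vol_long"] : List String))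
    (hd : (pvSp metric.toList).drop ((pvSp metric.toList).length - 2) = pvSp s.toList) :
    parse_metric_suffix_py_alt metric
      = (PySem.Str.join "_"
           (((pvSp metric.toList).take ((pvSp metric.toList).length - 2)).map String.ofList),
         PySem.Str.join "_"
           (((pvSp metric.toList).drop ((pvSp metric.toList).length - 2)).map String.ofList)) := by
  unfold parse_metric_suffix_py_alt
  simp only []
  rw [pvParts_eq]
  rw [PySem.List.slice_from_neg_ofNat _ 3 (by omega),
      PySem.List.slice_from_neg_ofNat _ 2 (by omega),
      PySem.List.slice_to_neg_ofNat _ 2 (by omega),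
      List.length_map, ← List.map_drop, ← List.map_drop, ← List.map_take]
  rw [if_neg, if_pos]
  · rw [Bool.and_eq_true, decide_eq_true_iff, decide_eq_true_iff]
    refine ⟨hn, ?_⟩
    rw [pvTail_eq metric s _ hd, pvSuf2, PySem.Set.mem_ofList]
    exact hmem
  · rw [Bool.and_eq_true, decide_eq_true_iff, decide_eq_true_iff]
    rintro ⟨hl3, hin3⟩
    rw [pvSuf3, PySem.Set.mem_ofList] at hin3
    simp only [List.mem_singleton] at hin3
    have := pvTail_inv metric "trend_short_long" ((pvSp metric.toList).length - 3)
      (by omega) hin3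
    rw [show pvSp ("trend_short_long" : String).toList
        = ["trend".toList, "short".toList, "long".toList] from by decide] at this
    exact h3 ⟨hl3, this⟩

theorem pvAlt_snap (metric : String)
    (h3 : ¬ (3 < (pvSp metric.toList).length ∧
      (pvSp metric.toList).drop ((pvSp metric.toList).length - 3)
        = ["trend".toList, "short".toList, "long".toList]))
    (h2 : ¬ (2 < (pvSp metric.toList).length ∧
      (pvSp metric.toList).drop ((pvSp metric.toList).length - 2) ∈
        ([["season".toList, "mean".toList], ["roll".toList, "short".toList],
          ["roll".toList, "mid".toList], ["roll".toList, "long".toList],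
          ["vol".toList, "short".toList], ["vol".toList, "mid".toList],
          ["vol".toList, "long".toList]] : List (List (List Char))))) :
    parse_metric_suffix_py_alt metric = (metric, "snapshot") := by
  unfold parse_metric_suffix_py_alt
  simp only []
  rw [pvParts_eq]
  rw [PySem.List.slice_from_neg_ofNat _ 3 (by omega),
      PySem.List.slice_from_neg_ofNat _ 2 (by omega),
      List.length_map, ← List.map_drop, ← List.map_drop]
  rw [if_neg, if_neg]
  · rw [Bool.and_eq_true, decide_eq_true_iff, decide_eq_true_iff]
    rintro ⟨hl2, hin2⟩
    rw [pvSuf2, PySem.Set.mem_ofList] at hin2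
    simp only [List.mem_cons, List.not_mem_nil, or_false] at hin2
    apply h2
    refine ⟨hl2, ?_⟩
    rcases hin2 with h | h | h | h | h | h | h <;>
      · have := pvTail_inv metric _ ((pvSp metric.toList).length - 2) (by omega) h
        rw [this]
        decide
  · rw [Bool.and_eq_true, decide_eq_true_iff, decide_eq_true_iff]
    rintro ⟨hl3, hin3⟩
    rw [pvSuf3, PySem.Set.mem_ofList] at hin3
    simp only [List.mem_singleton] at hin3
    have := pvTail_inv metric "trend_short_long" ((pvSp metric.toList).length - 3)
      (by omega) hin3
    rw [show pvSp ("trend_short_long" : String).toList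
        = ["trend".toList, "short".toList, "long".toList] from by decide] at this
    exact h3 ⟨hl3, this⟩

theorem pvPair_eq (metric s : String) (k : Nat)
    (hk : (pvSp s.toList).length = k)
    (hlt : k < (pvSp metric.toList).length)
    (h : (pvSp metric.toList).drop ((pvSp metric.toList).length - k) = pvSp s.toList) :
    (PySem.Str.slice metric none (some (-(PySem.Str.len ("_" ++ s) : Int))), s)
      = (PySem.Str.join "_"
           (((pvSp metric.toList).take ((pvSp metric.toList).length - k)).map String.ofList),
         PySem.Str.join "_"
           (((pvSp metric.toList).drop ((pvSp metric.toList).length - k)).map String.ofList)) := by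
  subst hk
  exact congrArg₂ Prod.mk (pvBase_eq metric s hlt h) (pvTail_eq metric s _ h).symm

theorem pvMain (metric : String) :
    parse_metric_suffix_py metric = parse_metric_suffix_py_alt metric := by
  by_cases h3 : 3 < (pvSp metric.toList).length ∧
      (pvSp metric.toList).drop ((pvSp metric.toList).length - 3)
        = ["trend".toList, "short".toList, "long".toList]
  · -- trend_short_long matches
    have hd2 : (pvSp metric.toList).drop ((pvSp metric.toList).length - 2)
        = ["short".toList, "long".toList] := by
      have hdd : (pvSp metric.toList).drop ((pvSp metric.toList).length - 2)
          = List.drop 1 ((pvSp metric.toList).drop ((pvSp metric.toList).length - 3)) := by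
        rw [List.drop_drop]
        congr 1
        omega
      rw [hdd, h3.2]
      rfl
    have e_season_mean : ¬ PySem.Str.endswith metric ("_" ++ "season_mean") = true := by
      rw [pvCond2 metric _ "season".toList "mean".toList (by decide)]
      rintro ⟨-, hdd⟩
      rw [hd2] at hdd
      exact absurd hdd (by decide)
    have e_roll_short : ¬ PySem.Str.endswith metric ("_" ++ "roll_short") = true := by
      rw [pvCond2 metric _ "roll".toList "short".toList (by decide)]
      rintro ⟨-, hdd⟩
      rw [hd2] at hdd
      exact absurd hdd (by decide)
    have e_roll_mid : ¬ PySem.Str.endswith metric ("_" ++ "roll_mid") = true := by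
      rw [pvCond2 metric _ "roll".toList "mid".toList (by decide)]
      rintro ⟨-, hdd⟩
      rw [hd2] at hdd
      exact absurd hdd (by decide)
    have e_roll_long : ¬ PySem.Str.endswith metric ("_" ++ "roll_long") = true := by
      rw [pvCond2 metric _ "roll".toList "long".toList (by decide)]
      rintro ⟨-, hdd⟩
      rw [hd2] at hdd
      exact absurd hdd (by decide)
    have epos : PySem.Str.endswith metric ("_" ++ "trend_short_long") = true := by
      rw [pvCond3 metric _ "trend".toList "short".toList "long".toList (by decide)]
      exact h3
    have hd' : (pvSp metric.toList).drop ((pvSp metric.toList).length - 3)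
        = pvSp ("trend_short_long" : String).toList := by
      rw [show pvSp ("trend_short_long" : String).toList
          = ["trend".toList, "short".toList, "long".toList] from by decide]
      exact h3.2
    rw [pvAlt_three metric h3]
    simp only [parse_metric_suffix_py, pyA_go]
    rw [if_neg e_season_mean, if_neg e_roll_short, if_neg e_roll_mid, if_neg e_roll_long,
        if_pos epos]
    exact pvPair_eq metric "trend_short_long" 3 (by decide) h3.1 hd'
  · by_cases h2 : 2 < (pvSp metric.toList).length ∧
        (pvSp metric.toList).drop ((pvSp metric.toList).length - 2) ∈
          ([["season".toList, "mean".toList], ["roll".toList, "short".toList], ["roll".toList, "mid".toList], ["roll".toList, "long".toList], ["vol".toList, "short".toList], ["vol".toList, "mid".toList], ["vol".toList, "long".toList]] : List (List (List Char)))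
    · -- one of the seven two-token suffixes matches
      obtain ⟨hn, hmem7⟩ := h2
      have notc : ∀ (t : String) (a b : List Char), pvSp t.toList = [a, b] →
          (pvSp metric.toList).drop ((pvSp metric.toList).length - 2) ≠ [a, b] →
          ¬ PySem.Str.endswith metric ("_" ++ t) = true := by
        intro t a b hsp hne
        rw [pvCond2 metric t a b hsp]
        rintro ⟨-, hdd⟩
        exact hne hdd
      simp only [List.mem_cons, List.not_mem_nil, or_false] at hmem7
      rcases hmem7 with hd | hd | hd | hd | hd | hd | hd
      · -- season_mean
        have epos : PySem.Str.endswith metric ("_" ++ "season_mean") = true := by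
          rw [pvCond2 metric _ "season".toList "mean".toList (by decide)]
          exact ⟨hn, hd⟩
        have hd' : (pvSp metric.toList).drop ((pvSp metric.toList).length - 2) = pvSp ("season_mean" : String).toList := by
          rw [show pvSp ("season_mean" : String).toList = ["season".toList, "mean".toList] from by decide]
          exact hd
        rw [pvAlt_two metric h3 hn "season_mean" (by simp) hd']
        simp only [parse_metric_suffix_py, pyA_go]
        rw [if_pos epos]
        exact pvPair_eq metric "season_mean" 2 (by decide) hn hd'
      · -- roll_short
        have e_season_mean : ¬ PySem.Str.endswith metric ("_" ++ "season_mean") = true :=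
          notc "season_mean" "season".toList "mean".toList (by decide)
            (by rw [hd]; decide)
        have epos : PySem.Str.endswith metric ("_" ++ "roll_short") = true := by
          rw [pvCond2 metric _ "roll".toList "short".toList (by decide)]
          exact ⟨hn, hd⟩
        have hd' : (pvSp metric.toList).drop ((pvSp metric.toList).length - 2) = pvSp ("roll_short" : String).toList := by
          rw [show pvSp ("roll_short" : String).toList = ["roll".toList, "short".toList] from by decide]
          exact hd
        rw [pvAlt_two metric h3 hn "roll_short" (by simp) hd']
        simp only [parse_metric_suffix_py, pyA_go]
        rw [if_neg e_season_mean, if_pos epos]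
        exact pvPair_eq metric "roll_short" 2 (by decide) hn hd'
      · -- roll_mid
        have e_season_mean : ¬ PySem.Str.endswith metric ("_" ++ "season_mean") = true :=
          notc "season_mean" "season".toList "mean".toList (by decide)
            (by rw [hd]; decide)
        have e_roll_short : ¬ PySem.Str.endswith metric ("_" ++ "roll_short") = true :=
          notc "roll_short" "roll".toList "short".toList (by decide)
            (by rw [hd]; decide)
        have epos : PySem.Str.endswith metric ("_" ++ "roll_mid") = true := by
          rw [pvCond2 metric _ "roll".toList "mid".toList (by decide)]
          exact ⟨hn, hd⟩
        have hd' : (pvSp metric.toList).drop ((pvSp metric.toList).length - 2) = pvSp ("roll_mid" : String).toList := by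
          rw [show pvSp ("roll_mid" : String).toList = ["roll".toList, "mid".toList] from by decide]
          exact hd
        rw [pvAlt_two metric h3 hn "roll_mid" (by simp) hd']
        simp only [parse_metric_suffix_py, pyA_go]
        rw [if_neg e_season_mean, if_neg e_roll_short, if_pos epos]
        exact pvPair_eq metric "roll_mid" 2 (by decide) hn hd'
      · -- roll_long
        have e_season_mean : ¬ PySem.Str.endswith metric ("_" ++ "season_mean") = true :=
          notc "season_mean" "season".toList "mean".toList (by decide)
            (by rw [hd]; decide)
        have e_roll_short : ¬ PySem.Str.endswith metric ("_" ++ "roll_short") = true :=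
          notc "roll_short" "roll".toList "short".toList (by decide)
            (by rw [hd]; decide)
        have e_roll_mid : ¬ PySem.Str.endswith metric ("_" ++ "roll_mid") = true :=
          notc "roll_mid" "roll".toList "mid".toList (by decide)
            (by rw [hd]; decide)
        have epos : PySem.Str.endswith metric ("_" ++ "roll_long") = true := by
          rw [pvCond2 metric _ "roll".toList "long".toList (by decide)]
          exact ⟨hn, hd⟩
        have hd' : (pvSp metric.toList).drop ((pvSp metric.toList).length - 2) = pvSp ("roll_long" : String).toList := by
          rw [show pvSp ("roll_long" : String).toList = ["roll".toList, "long".toList] from by decide]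
          exact hd
        rw [pvAlt_two metric h3 hn "roll_long" (by simp) hd']
        simp only [parse_metric_suffix_py, pyA_go]
        rw [if_neg e_season_mean, if_neg e_roll_short, if_neg e_roll_mid, if_pos epos]
        exact pvPair_eq metric "roll_long" 2 (by decide) hn hd'
      · -- vol_short
        have e_season_mean : ¬ PySem.Str.endswith metric ("_" ++ "season_mean") = true :=
          notc "season_mean" "season".toList "mean".toList (by decide)
            (by rw [hd]; decide)
        have e_roll_short : ¬ PySem.Str.endswith metric ("_" ++ "roll_short") = true :=
          notc "roll_short" "roll".toList "short".toList (by decide)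
            (by rw [hd]; decide)
        have e_roll_mid : ¬ PySem.Str.endswith metric ("_" ++ "roll_mid") = true :=
          notc "roll_mid" "roll".toList "mid".toList (by decide)
            (by rw [hd]; decide)
        have e_roll_long : ¬ PySem.Str.endswith metric ("_" ++ "roll_long") = true :=
          notc "roll_long" "roll".toList "long".toList (by decide)
            (by rw [hd]; decide)
        have e_trend : ¬ PySem.Str.endswith metric ("_" ++ "trend_short_long") = true := by
          rw [pvCond3 metric _ "trend".toList "short".toList "long".toList (by decide)]
          exact h3
        have epos : PySem.Str.endswith metric ("_" ++ "vol_short") = true := by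
          rw [pvCond2 metric _ "vol".toList "short".toList (by decide)]
          exact ⟨hn, hd⟩
        have hd' : (pvSp metric.toList).drop ((pvSp metric.toList).length - 2) = pvSp ("vol_short" : String).toList := by
          rw [show pvSp ("vol_short" : String).toList = ["vol".toList, "short".toList] from by decide]
          exact hd
        rw [pvAlt_two metric h3 hn "vol_short" (by simp) hd']
        simp only [parse_metric_suffix_py, pyA_go]
        rw [if_neg e_season_mean, if_neg e_roll_short, if_neg e_roll_mid, if_neg e_roll_long, if_neg e_trend, if_pos epos]
        exact pvPair_eq metric "vol_short" 2 (by decide) hn hd'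
      · -- vol_mid
        have e_season_mean : ¬ PySem.Str.endswith metric ("_" ++ "season_mean") = true :=
          notc "season_mean" "season".toList "mean".toList (by decide)
            (by rw [hd]; decide)
        have e_roll_short : ¬ PySem.Str.endswith metric ("_" ++ "roll_short") = true :=
          notc "roll_short" "roll".toList "short".toList (by decide)
            (by rw [hd]; decide)
        have e_roll_mid : ¬ PySem.Str.endswith metric ("_" ++ "roll_mid") = true :=
          notc "roll_mid" "roll".toList "mid".toList (by decide)
            (by rw [hd]; decide)
        have e_roll_long : ¬ PySem.Str.endswith metric ("_" ++ "roll_long") = true :=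
          notc "roll_long" "roll".toList "long".toList (by decide)
            (by rw [hd]; decide)
        have e_trend : ¬ PySem.Str.endswith metric ("_" ++ "trend_short_long") = true := by
          rw [pvCond3 metric _ "trend".toList "short".toList "long".toList (by decide)]
          exact h3
        have e_vol_short : ¬ PySem.Str.endswith metric ("_" ++ "vol_short") = true :=
          notc "vol_short" "vol".toList "short".toList (by decide)
            (by rw [hd]; decide)
        have epos : PySem.Str.endswith metric ("_" ++ "vol_mid") = true := by
          rw [pvCond2 metric _ "vol".toList "mid".toList (by decide)]
          exact ⟨hn, hd⟩
        have hd' : (pvSp metric.toList).drop ((pvSp metric.toList).length - 2) = pvSp ("vol_mid" : String).toList := by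
          rw [show pvSp ("vol_mid" : String).toList = ["vol".toList, "mid".toList] from by decide]
          exact hd
        rw [pvAlt_two metric h3 hn "vol_mid" (by simp) hd']
        simp only [parse_metric_suffix_py, pyA_go]
        rw [if_neg e_season_mean, if_neg e_roll_short, if_neg e_roll_mid, if_neg e_roll_long, if_neg e_trend, if_neg e_vol_short, if_pos epos]
        exact pvPair_eq metric "vol_mid" 2 (by decide) hn hd'
      · -- vol_long
        have e_season_mean : ¬ PySem.Str.endswith metric ("_" ++ "season_mean") = true :=
          notc "season_mean" "season".toList "mean".toList (by decide)
            (by rw [hd]; decide)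
        have e_roll_short : ¬ PySem.Str.endswith metric ("_" ++ "roll_short") = true :=
          notc "roll_short" "roll".toList "short".toList (by decide)
            (by rw [hd]; decide)
        have e_roll_mid : ¬ PySem.Str.endswith metric ("_" ++ "roll_mid") = true :=
          notc "roll_mid" "roll".toList "mid".toList (by decide)
            (by rw [hd]; decide)
        have e_roll_long : ¬ PySem.Str.endswith metric ("_" ++ "roll_long") = true :=
          notc "roll_long" "roll".toList "long".toList (by decide)
            (by rw [hd]; decide)
        have e_trend : ¬ PySem.Str.endswith metric ("_" ++ "trend_short_long") = true := by
          rw [pvCond3 metric _ "trend".toList "short".toList "long".toList (by decide)]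
          exact h3
        have e_vol_short : ¬ PySem.Str.endswith metric ("_" ++ "vol_short") = true :=
          notc "vol_short" "vol".toList "short".toList (by decide)
            (by rw [hd]; decide)
        have e_vol_mid : ¬ PySem.Str.endswith metric ("_" ++ "vol_mid") = true :=
          notc "vol_mid" "vol".toList "mid".toList (by decide)
            (by rw [hd]; decide)
        have epos : PySem.Str.endswith metric ("_" ++ "vol_long") = true := by
          rw [pvCond2 metric _ "vol".toList "long".toList (by decide)]
          exact ⟨hn, hd⟩
        have hd' : (pvSp metric.toList).drop ((pvSp metric.toList).length - 2) = pvSp ("vol_long" : String).toList := by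
          rw [show pvSp ("vol_long" : String).toList = ["vol".toList, "long".toList] from by decide]
          exact hd
        rw [pvAlt_two metric h3 hn "vol_long" (by simp) hd']
        simp only [parse_metric_suffix_py, pyA_go]
        rw [if_neg e_season_mean, if_neg e_roll_short, if_neg e_roll_mid, if_neg e_roll_long, if_neg e_trend, if_neg e_vol_short, if_neg e_vol_mid, if_pos epos]
        exact pvPair_eq metric "vol_long" 2 (by decide) hn hd'
    · -- no known suffix: both return (metric, "snapshot")
      have notc2 : ∀ (t : String) (a b : List Char), pvSp t.toList = [a, b] →
          [a, b] ∈ ([["season".toList, "mean".toList], ["roll".toList, "short".toList], ["roll".toList, "mid".toList], ["roll".toList, "long".toList], ["vol".toList, "short".toList], ["vol".toList, "mid".toList], ["vol".toList, "long".toList]] : List (List (List Char))) →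
          ¬ PySem.Str.endswith metric ("_" ++ t) = true := by
        intro t a b hsp hmem
        rw [pvCond2 metric t a b hsp]
        rintro ⟨hl, hdd⟩
        exact h2 ⟨hl, by rw [hdd]; exact hmem⟩
      have e_trend : ¬ PySem.Str.endswith metric ("_" ++ "trend_short_long") = true := by
        rw [pvCond3 metric _ "trend".toList "short".toList "long".toList (by decide)]
        exact h3
      rw [pvAlt_snap metric h3 h2]
      simp only [parse_metric_suffix_py, pyA_go]
      rw [if_neg (notc2 "season_mean" "season".toList "mean".toList (by decide) (by decide)),
          if_neg (notc2 "roll_short" "roll".toList "short".toList (by decide) (by decide)),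
          if_neg (notc2 "roll_mid" "roll".toList "mid".toList (by decide) (by decide)),
          if_neg (notc2 "roll_long" "roll".toList "long".toList (by decide) (by decide)),
          if_neg e_trend,
          if_neg (notc2 "vol_short" "vol".toList "short".toList (by decide) (by decide)),
          if_neg (notc2 "vol_mid" "vol".toList "mid".toList (by decide) (by decide)),
          if_neg (notc2 "vol_long" "vol".toList "long".toList (by decide) (by decide))]

-- ===== VERDICT (by name: the statement is the Claim_ definition above) =====
theorem parse_metric_suffix_py_spec : Claim_equal_parse_metric_suffix_py := by
  unfold Claim_equal_parse_metric_suffix_py Spec_parse_metric_suffix_py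
  intro metric _
  exact pvMain metric
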